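-- pv_equiv track=rewrite | github.com/lte1711/cnt_breakout | tools/analyze_breakout_v3_setup_bottleneck.py | _count_stage_pass_fail
-- ===== SOURCE A (Python) =====
-- from collections import Counter
-- from typing import Any
--
-- def _sorted_counter(counter: Counter[str]) -> dict[str, int]:
--     return dict(sorted(counter.items(), key=lambda item: (-item[1], item[0])))
--
-- def _count_stage_pass_fail(events: list[dict[str, Any]]) -> tuple[dict[str, int], dict[str, int]]:
--     pass_counts: Counter[str] = Counter()
--     fail_counts: Counter[str] = Counter()
--     for event in events:
--         for stage_name, passed in event.get("stage_flags", {}).items():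
--             if passed:
--                 pass_counts[stage_name] += 1
--             else:
--                 fail_counts[stage_name] += 1
--     return _sorted_counter(pass_counts), _sorted_counter(fail_counts)
-- ===== SOURCE B (Python) =====
-- from typing import Any
--
--
-- def _tally(names: list[str]) -> dict[str, int]:
--     # Sort-then-scan: equal names become adjacent, one linear scan merges each
--     # run into (name, run_length); no hash counter is used anywhere.
--     names = sorted(names)
--     grouped: list[tuple[str, int]] = []
--     for name in names:
--         if grouped and grouped[-1][0] == name:
--             grouped[-1] = (name, grouped[-1][1] + 1)
--         else:
--             grouped.append((name, 1))
--     grouped.sort(key=lambda kv: (-kv[1], kv[0]))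
--     return dict(grouped)
--
--
-- def _count_stage_pass_fail(events: list[dict[str, Any]]) -> tuple[dict[str, int], dict[str, int]]:
--     flags = [item for event in events for item in event.get("stage_flags", {}).items()]
--     return (_tally([s for s, p in flags if p]),
--             _tally([s for s, p in flags if not p]))
-- ===== Notes on version B (the rewrite author's own statement) =====
-- stated objective: alternative
-- what changed: B replaces A's hash counting (two Counters filled while streaming events) by sort-then-scan: it collects the pass and fail stage-name lists, sorts each, merges adjacent equal names into (name, run_length) pairs in one linear scan, and then applies the same (-count, name) sort; no Counter/dict is used for counting.
import Mathlib
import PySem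

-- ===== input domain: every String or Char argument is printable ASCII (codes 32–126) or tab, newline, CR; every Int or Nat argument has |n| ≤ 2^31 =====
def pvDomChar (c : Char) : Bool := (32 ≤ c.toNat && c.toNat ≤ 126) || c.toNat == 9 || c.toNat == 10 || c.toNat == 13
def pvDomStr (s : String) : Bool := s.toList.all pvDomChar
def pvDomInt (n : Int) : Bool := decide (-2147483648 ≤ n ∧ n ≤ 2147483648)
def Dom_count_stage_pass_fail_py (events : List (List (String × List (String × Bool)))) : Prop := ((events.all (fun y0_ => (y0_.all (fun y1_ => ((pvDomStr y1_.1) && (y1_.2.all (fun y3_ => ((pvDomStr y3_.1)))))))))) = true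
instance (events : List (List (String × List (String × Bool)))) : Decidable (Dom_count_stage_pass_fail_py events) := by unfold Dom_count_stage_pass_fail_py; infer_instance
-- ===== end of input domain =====

-- B replaces A's two hash counters by sort-then-scan: each side's stage-name list is sorted,
-- adjacent equal names are merged into (name, run_length) pairs in one scan, then the same
-- (-count, name) sort is applied; no counter dict is used. Alternative algorithm, same result.

-- ===== PORT A =====
-- A sorts counter.items() by (-count, name); dict(...) of distinct-keyed pairs is that list.
def pySortedCounter (c : PySem.Dict String Int) : List (String × Int) :=
  PySem.List.sorted2 c.items (fun item => -item.2) (fun item => item.1)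

def count_stage_pass_fail_py (events : List (List (String × List (String × Bool)))) : (List (String × Int)) × (List (String × Int)) :=
  let counts := events.foldl
    (fun acc event =>
      ((PySem.Dict.mk event).getD "stage_flags" []).foldl
        (fun acc2 sf =>
          if sf.2 then (acc2.1.modify sf.1 0 (· + 1), acc2.2)
          else (acc2.1, acc2.2.modify sf.1 0 (· + 1)))
        acc)
    (PySem.Dict.empty, PySem.Dict.empty)
  (pySortedCounter counts.1, pySortedCounter counts.2)

-- ===== PORT B =====
-- the body of B's grouping loop: merge `name` into the last run or open a new run
def pvGroupStep (acc : List (String × Int)) (name : String) : List (String × Int) :=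
  match acc.getLast? with
  | some last => if last.1 == name then acc.dropLast ++ [(name, last.2 + 1)] else acc ++ [(name, 1)]
  | none => [(name, 1)]

def pvTally (names : List String) : List (String × Int) :=
  let s := PySem.List.sorted names (fun x => x)
  let grouped := s.foldl pvGroupStep []
  PySem.List.sorted2 grouped (fun kv => -kv.2) (fun kv => kv.1)

def count_stage_pass_fail_py_alt (events : List (List (String × List (String × Bool)))) : (List (String × Int)) × (List (String × Int)) :=
  let flags := events.flatMap (fun event => (PySem.Dict.mk event).getD "stage_flags" [])
  (pvTally ((flags.filter (fun f => f.2)).map Prod.fst),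
   pvTally ((flags.filter (fun f => !f.2)).map Prod.fst))

-- ===== PRECONDITION & SPEC =====
def Spec_count_stage_pass_fail_py (events : List (List (String × List (String × Bool)))) (out : (List (String × Int)) × (List (String × Int))) : Prop := out = count_stage_pass_fail_py_alt events
instance (events : List (List (String × List (String × Bool)))) (out : (List (String × Int)) × (List (String × Int))) : Decidable (Spec_count_stage_pass_fail_py events out) := by unfold Spec_count_stage_pass_fail_py; infer_instance

-- ===== CLAIM (what is proved, stated in full; the proofs are below) =====
def Claim_equal_count_stage_pass_fail_py : Prop := ∀ (events : List (List (String × List (String × Bool)))), Dom_count_stage_pass_fail_py events → Spec_count_stage_pass_fail_py events (count_stage_pass_fail_py events)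

-- ===== LEMMAS AND PROOFS =====

-- recursive view of B's grouping loop (used only by the proofs)
def pvRunsAux (cur : String) (cnt : Int) : List String → List (String × Int)
  | [] => [(cur, cnt)]
  | y :: rest => if y == cur then pvRunsAux cur (cnt + 1) rest else (cur, cnt) :: pvRunsAux y 1 rest

-- the counter of a name list, presented as PySem.Dict.items_counter presents it
def pvG (l : List String) : List (String × Int) :=
  (PySem.List.dedup l).map (fun k => (k, (l.count k : Int)))

-- B's grouping loop is the recursive run-length grouping
theorem pv_foldl_groupStep (t : List String) :
    ∀ (acc : List (String × Int)) (x : String) (n : Int),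
    t.foldl pvGroupStep (acc ++ [(x, n)]) = acc ++ pvRunsAux x n t := by
  induction t with
  | nil => intro acc x n; rfl
  | cons y t ih =>
    intro acc x n
    by_cases h : y = x
    · subst h
      simp only [List.foldl_cons, pvGroupStep, List.getLast?_concat, List.dropLast_concat,
        beq_self_eq_true, if_pos, pvRunsAux]
      exact ih acc y (n + 1)
    · have hb : (x == y) = false := by simp [Ne.symm h]
      have hb' : (y == x) = false := by simp [h]
      simp only [List.foldl_cons, pvGroupStep, List.getLast?_concat, hb, Bool.false_eq_true,
        if_false, pvRunsAux, hb']
      have h2 := ih (acc ++ [(x, n)]) y 1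
      simpa [List.append_assoc] using h2

-- two generic facts about PySem's first-occurrence dedup (foldl Set.add)
theorem pv_foldl_add_filter (y : String) (l : List String) :
    ∀ acc : PySem.Set String, y ∈ acc →
    List.foldl PySem.Set.add acc l = List.foldl PySem.Set.add acc (l.filter (fun z => !(z == y))) := by
  induction l with
  | nil => intro acc _; rfl
  | cons x t ih =>
    intro acc hy
    by_cases hx : x = y
    · subst hx
      have : PySem.Set.add acc x = acc := by simp [PySem.Set.add, PySem.Set.contains, hy]
      simp [List.foldl_cons, this, ih acc hy]
    · have hy' : y ∈ PySem.Set.add acc x := by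
        simp [PySem.Set.add]; split <;> simp [hy]
      simp [hx, List.foldl_cons, ih _ hy']

theorem pv_foldl_add_cons (y : String) (l : List String) :
    ∀ acc : PySem.Set String, (∀ z ∈ l, z ≠ y) →
    List.foldl PySem.Set.add (y :: acc) l = y :: List.foldl PySem.Set.add acc l := by
  induction l with
  | nil => intro acc _; rfl
  | cons x t ih =>
    intro acc hne
    have hx : x ≠ y := hne x (List.mem_cons_self)
    have hstep : PySem.Set.add (y :: acc) x = y :: PySem.Set.add acc x := by
      simp [PySem.Set.add, PySem.Set.contains, hx]
      split <;> simp
    simp only [List.foldl_cons, hstep]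
    exact ih _ (fun z hz => hne z (List.mem_cons_of_mem _ hz))

theorem pv_dedup_cons (y : String) (t : List String) :
    PySem.List.dedup (y :: t) = y :: PySem.List.dedup (t.filter (fun z => !(z == y))) := by
  simp only [PySem.List.dedup_eq_ofList, PySem.Set.ofList_eq_foldl, List.foldl_cons]
  have h0 : PySem.Set.add [] y = [y] := rfl
  rw [h0, pv_foldl_add_filter y t [y] (by simp)]
  exact pv_foldl_add_cons y _ [] (by intro z hz; simpa using (List.mem_filter.1 hz).2)

-- peeling one distinct name off the counter presentation
theorem pv_g_cons (y : String) (t : List String) :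
    pvG (y :: t) = (y, (t.count y : Int) + 1) :: pvG (t.filter (fun z => !(z == y))) := by
  unfold pvG
  rw [pv_dedup_cons, List.map_cons]
  congr 1
  · simp
  · refine List.map_congr_left ?_
    intro k hk
    have hk' : k ∈ t.filter (fun z => !(z == y)) := (PySem.List.mem_dedup _ _).1 hk
    have hne : k ≠ y := by simpa using (List.mem_filter.1 hk').2
    simp [hne, hne.symm, List.count_filter]

theorem pv_not_mem_of_sorted {x y : String} {t : List String}
    (hp : List.Pairwise (· ≤ ·) (x :: y :: t)) (hxy : x ≠ y) : x ∉ y :: t := by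
  rcases List.pairwise_cons.1 hp with ⟨hx, hp'⟩
  rcases List.pairwise_cons.1 hp' with ⟨hy, _⟩
  intro hmem
  rcases List.mem_cons.1 hmem with h | h
  · exact hxy h
  · exact hxy (le_antisymm (hx y List.mem_cons_self) (hy x h))

-- on a sorted tail, run-length grouping produces exactly the counter's items
theorem pv_runsAux_sorted (t : List String) :
    ∀ (x : String) (n : Int), List.Pairwise (· ≤ ·) (x :: t) →
    pvRunsAux x n t = (x, n + (t.count x : Int)) :: pvG (t.filter (fun z => !(z == x))) := by
  induction t with
  | nil => intro x n _; simp [pvRunsAux, pvG]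
  | cons y t ih =>
    intro x n hp
    by_cases h : y = x
    · subst h
      have hp' : List.Pairwise (· ≤ ·) (y :: t) := by
        rcases List.pairwise_cons.1 hp with ⟨hx, hp2⟩
        exact List.pairwise_cons.2 ⟨fun z hz => hx z (List.mem_cons_of_mem _ hz), (List.pairwise_cons.1 hp2).2⟩
      simp only [pvRunsAux, beq_self_eq_true, if_pos]
      rw [ih y (n + 1) hp']
      simp only [List.count_cons, List.filter_cons, beq_self_eq_true, Bool.not_true,
        Bool.false_eq_true, if_false]
      congr 2
      push_cast; ring
    · have hb : (y == x) = false := by simp [h]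
      have hnm : x ∉ y :: t := pv_not_mem_of_sorted hp (Ne.symm h)
      have hp' : List.Pairwise (· ≤ ·) (y :: t) := (List.pairwise_cons.1 hp).2
      simp only [pvRunsAux, hb, Bool.false_eq_true, if_false]
      rw [ih y 1 hp']
      have hcount : (y :: t).count x = 0 := List.count_eq_zero.2 hnm
      have hfilt : (y :: t).filter (fun z => !(z == x)) = y :: t := by
        refine List.filter_eq_self.2 ?_
        intro z hz
        have hzx : z ≠ x := fun e => hnm (e ▸ hz)
        simp [hzx]
      rw [hfilt, pv_g_cons, hcount]
      norm_num
      ring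

theorem pv_pvG_perm_of_perm {l l' : List String} (h : l.Perm l') : (pvG l).Perm (pvG l') := by
  unfold pvG
  have hmap : (PySem.List.dedup l).map (fun k => (k, (l.count k : Int)))
      = (PySem.List.dedup l).map (fun k => (k, (l'.count k : Int))) := by
    refine List.map_congr_left ?_
    intro k _
    rw [h.count_eq]
  rw [hmap]
  refine List.Perm.map _ ?_
  refine (List.perm_ext_iff_of_nodup (PySem.List.nodup_dedup _) (PySem.List.nodup_dedup _)).2 ?_
  intro a
  rw [PySem.List.mem_dedup, PySem.List.mem_dedup]
  exact ⟨fun ha => h.mem_iff.1 ha, fun ha => h.mem_iff.2 ha⟩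

-- B's grouped list of any name list is a permutation of A's counter items
theorem pv_grouped_perm (names : List String) :
    ((PySem.List.sorted names (fun x => x)).foldl pvGroupStep []).Perm
      ((PySem.Dict.counter names).items) := by
  rw [PySem.Dict.items_counter]
  rcases hs : PySem.List.sorted names (fun x => x) with _ | ⟨x, t⟩
  · have : names = [] := (PySem.List.sorted_eq_nil_iff _ _ _).1 hs
    subst this
    simp [PySem.Set.ofList, PySem.Set.empty]
  · have hsp : List.Pairwise (· ≤ ·) (x :: t) := by
      have := PySem.List.sorted_pairwise names (fun x => x)
      rw [hs] at this
      exact this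
    have h1 : (x :: t).foldl pvGroupStep [] = pvRunsAux x 1 t := by
      have h0 : pvGroupStep [] x = [] ++ [(x, (1 : Int))] := rfl
      rw [List.foldl_cons, h0, pv_foldl_groupStep t [] x 1, List.nil_append]
    rw [h1, pv_runsAux_sorted t x 1 hsp]
    have h2 : (x, (1 : Int) + (t.count x : Int)) :: pvG (t.filter (fun z => !(z == x))) = pvG (x :: t) := by
      rw [pv_g_cons]
      congr 2
      ring
    rw [h2]
    have hperm : (x :: t).Perm names := by
      have := PySem.List.sorted_perm names (fun x => x) false
      rw [hs] at this
      exact this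
    have := pv_pvG_perm_of_perm hperm
    unfold pvG at this
    rw [PySem.List.dedup_eq_ofList] at this
    exact this

-- sorted2 with keys (k1, k2) is sorted with the single lexicographic key
theorem pv_sorted2_eq_sorted_lex {α : Type} (xs : List α) (k1 : α → Int) (k2 : α → String) :
    PySem.List.sorted2 xs k1 k2 = PySem.List.sorted xs (fun a => toLex (k1 a, k2 a)) := by
  have hbefore : (fun a b => decide (k1 a < k1 b) || (!decide (k1 b < k1 a) && decide (k2 a < k2 b)))
      = fun a b => decide ((toLex (k1 a, k2 a)) < toLex (k1 b, k2 b)) := by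
    funext a b
    rcases lt_trichotomy (k1 a) (k1 b) with h|h|h
    · simp [Prod.Lex.lt_iff, h]
    · simp [Prod.Lex.lt_iff, h]
    · simp [Prod.Lex.lt_iff, h, lt_asymm h, ne_of_gt h]
  simp only [PySem.List.sorted2, PySem.List.sorted, if_neg (by decide : ¬ (false = true))]
  rw [hbefore]

-- two permuted pair lists sort identically under the injective (-count, name) key
theorem pv_sorted2_eq_of_perm (l l' : List (String × Int)) (h : l.Perm l') :
    PySem.List.sorted2 l (fun kv => -kv.2) (fun kv => kv.1)
      = PySem.List.sorted2 l' (fun kv => -kv.2) (fun kv => kv.1) := by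
  rw [pv_sorted2_eq_sorted_lex, pv_sorted2_eq_sorted_lex]
  refine PySem.List.eq_of_perm_of_pairwise_le_of_injective
    (fun kv : String × Int => toLex (-kv.2, kv.1)) ?_ ?_
    (PySem.List.sorted_pairwise _ _) (PySem.List.sorted_pairwise _ _)
  · intro a b hab
    have : (-a.2, a.1) = (-b.2, b.1) := by exact_mod_cast congrArg ofLex hab
    have h1 : a.1 = b.1 := (Prod.ext_iff.1 this).2
    have h2 : a.2 = b.2 := by have := (Prod.ext_iff.1 this).1; omega
    exact Prod.ext h1 h2
  · exact ((PySem.List.sorted_perm _ _ _).trans h).trans (PySem.List.sorted_perm _ _ _).symm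

-- per-side core: B's tally of a name list equals A's sorted counter of that list
theorem pv_tally_eq (names : List String) :
    pvTally names = pySortedCounter (PySem.Dict.counter names) := by
  unfold pvTally pySortedCounter
  exact pv_sorted2_eq_of_perm _ _ (pv_grouped_perm names)

-- A's branching two-counter loop over a stream = two sliced single-counter loops
theorem pv_pair_fold (l : List (String × Bool)) :
    ∀ acc : PySem.Dict String Int × PySem.Dict String Int,
    l.foldl
      (fun acc2 sf =>
        if sf.2 then (acc2.1.modify sf.1 0 (· + 1), acc2.2)
        else (acc2.1, acc2.2.modify sf.1 0 (· + 1))) acc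
    = (((l.filter (fun x => x.2)).map Prod.fst).foldl (fun d s => d.modify s 0 (· + 1)) acc.1,
       ((l.filter (fun x => !x.2)).map Prod.fst).foldl (fun d s => d.modify s 0 (· + 1)) acc.2) := by
  induction l with
  | nil => intro acc; rfl
  | cons x t ih =>
    intro acc
    by_cases hx : x.2
    · simp [hx, List.foldl_cons, ih]
    · simp [hx, List.foldl_cons, ih]

-- ===== VERDICT (by name: the statement is the Claim_ definition above) =====
theorem count_stage_pass_fail_py_spec : Claim_equal_count_stage_pass_fail_py := by
  intro events _
  unfold Spec_count_stage_pass_fail_py count_stage_pass_fail_py count_stage_pass_fail_py_alt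
  set flat := events.flatMap (fun e => (PySem.Dict.mk e).getD "stage_flags" []) with hflat
  have hA : events.foldl
      (fun acc event =>
        ((PySem.Dict.mk event).getD "stage_flags" []).foldl
          (fun acc2 sf =>
            if sf.2 then (acc2.1.modify sf.1 0 (· + 1), acc2.2)
            else (acc2.1, acc2.2.modify sf.1 0 (· + 1))) acc)
      (PySem.Dict.empty, PySem.Dict.empty)
      = (PySem.Dict.counter ((flat.filter (fun x => x.2)).map Prod.fst),
         PySem.Dict.counter ((flat.filter (fun x => !x.2)).map Prod.fst)) := by
    rw [← List.foldl_flatMap, ← hflat, pv_pair_fold flat (PySem.Dict.empty, PySem.Dict.empty),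
      PySem.Dict.counter_eq_foldl, PySem.Dict.counter_eq_foldl]
  simp only [hA]
  rw [pv_tally_eq, pv_tally_eq]
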